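-- pv_equiv track=rewrite | github.com/zly-VON/AA---Labs | Lab1/DjikstraMethod.py | lucas_power
-- ===== SOURCE A (Python) =====
-- def lucas_power(n: float):
--     if n == 1:
--         return (1, 1)
--     L, F = lucas_power(n // 2)
--     L, F = (L**2 + 5 * F**2) >> 1, L * F
--     if int(n) & 1:
--         return ((L + 5 * F) >> 1, (L + F) >> 1)
--     else:
--         return (L, F)
-- ===== SOURCE B (Python) =====
-- def lucas_power(n: float):
--     # iterative fast doubling: collect bits, then fold over them in reverse
--     bits = []
--     while n != 1:
--         bits.append(int(n) % 2)
--         n = n // 2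
--     L, F = 1, 1
--     for b in reversed(bits):
--         L, F = (L**2 + 5 * F**2) >> 1, L * F
--         if b:
--             L, F = (L + 5 * F) >> 1, (L + F) >> 1
--     return (L, F)
-- ===== Notes on version B (the rewrite author's own statement) =====
-- stated objective: alternative
-- what changed: Replaced the recursive fast-doubling with an iterative version: the bit sequence of n is collected by a halving loop, then a single fold over the reversed bits applies the doubling/step update; the recursion disappears entirely.
-- outside the precondition, e.g. on lucas_power(0): A raises RecursionError, B does not finish within the time limit
import Mathlib
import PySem

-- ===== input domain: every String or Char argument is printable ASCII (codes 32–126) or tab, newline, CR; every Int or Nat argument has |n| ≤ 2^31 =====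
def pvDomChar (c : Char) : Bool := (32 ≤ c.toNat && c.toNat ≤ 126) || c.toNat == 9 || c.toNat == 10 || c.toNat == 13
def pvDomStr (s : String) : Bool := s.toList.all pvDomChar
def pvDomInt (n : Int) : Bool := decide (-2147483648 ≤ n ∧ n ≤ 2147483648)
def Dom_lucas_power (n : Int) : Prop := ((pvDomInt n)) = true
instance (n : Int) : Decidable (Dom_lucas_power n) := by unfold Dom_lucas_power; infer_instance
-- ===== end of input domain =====

-- B is an iterative fast-doubling (explicit bit list + fold) replacing A's recursion; same values on n ≥ 1.

-- ===== PORT A =====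
-- literal port of A's recursion; the `n ≤ 1` guard only makes the non-terminating
-- (n ≤ 0, excluded by Pre_) case total; Python's `x >> 1` and `x & 1` are floor
-- division/mod by 2, exact as PySem.Int.floordiv/Int.emod here.
def lucas_power (n : Int) : Int × Int :=
  if n ≤ 1 then (1, 1)
  else
    let p := lucas_power (PySem.Int.floordiv n 2)
    let L := PySem.Int.floordiv (p.1 ^ 2 + 5 * p.2 ^ 2) 2
    let F := p.1 * p.2
    if n % 2 ≠ 0 then (PySem.Int.floordiv (L + 5 * F) 2, PySem.Int.floordiv (L + F) 2)
    else (L, F)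
termination_by n.toNat
decreasing_by
  have h2 : PySem.Int.floordiv n 2 = n / 2 := PySem.Int.floordiv_eq_ediv_of_pos (by omega)
  rw [h2]; omega

-- ===== PORT B =====
-- while n != 1: collect int(n) % 2, n = n // 2   (guard `n ≤ 1` again totalises n ≤ 0)
def pvBitsOf (n : Int) : List Int :=
  if n ≤ 1 then []
  else (n % 2) :: pvBitsOf (PySem.Int.floordiv n 2)
termination_by n.toNat
decreasing_by
  have h2 : PySem.Int.floordiv n 2 = n / 2 := PySem.Int.floordiv_eq_ediv_of_pos (by omega)
  rw [h2]; omega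

def pvLucasStep (p : Int × Int) (b : Int) : Int × Int :=
  let L := PySem.Int.floordiv (p.1 ^ 2 + 5 * p.2 ^ 2) 2
  let F := p.1 * p.2
  if b ≠ 0 then (PySem.Int.floordiv (L + 5 * F) 2, PySem.Int.floordiv (L + F) 2)
  else (L, F)

def lucas_power_alt (n : Int) : Int × Int :=
  (pvBitsOf n).reverse.foldl pvLucasStep (1, 1)

-- ===== PRECONDITION & SPEC =====
-- Pre_ excludes n ≤ 0, where Python A never returns (RecursionError).
def Pre_lucas_power (n : Int) : Prop := 1 ≤ n
instance (n : Int) : Decidable (Pre_lucas_power n) := by unfold Pre_lucas_power; infer_instance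
def pvWitness_lucas_power : Int := (10)
def Spec_lucas_power (n : Int) (out : Int × Int) : Prop := out = lucas_power_alt n
instance (n : Int) (out : Int × Int) : Decidable (Spec_lucas_power n out) := by unfold Spec_lucas_power; infer_instance

-- ===== CLAIM (what is proved, stated in full; the proofs are below) =====
def Claim_equal_lucas_power : Prop := ∀ (n : Int), Dom_lucas_power n → Pre_lucas_power n → Spec_lucas_power n (lucas_power n)

-- ===== LEMMAS AND PROOFS =====

theorem pv_main (k : Nat) : ∀ (n : Int), 1 ≤ n → n.toNat ≤ k → lucas_power n = lucas_power_alt n := by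
  induction k with
  | zero => intro n h1 h0; omega
  | succ k ih =>
    intro n h1 hk
    by_cases h : n ≤ 1
    · have : n = 1 := le_antisymm h h1
      subst this
      simp [lucas_power, lucas_power_alt, pvBitsOf]
    · have hfd : PySem.Int.floordiv n 2 = n / 2 := PySem.Int.floordiv_eq_ediv_of_pos (by omega)
      have hrec : lucas_power (PySem.Int.floordiv n 2) = lucas_power_alt (PySem.Int.floordiv n 2) := by
        apply ih
        · rw [hfd]; omega
        · rw [hfd]; omega
      have halt : lucas_power_alt n = pvLucasStep (lucas_power_alt (PySem.Int.floordiv n 2)) (n % 2) := by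
        conv_lhs => rw [lucas_power_alt, pvBitsOf, if_neg h]
        rw [List.reverse_cons, List.foldl_append]
        simp [lucas_power_alt]
      rw [lucas_power, if_neg h, hrec, halt, pvLucasStep]

-- ===== VERDICT (by name: the statement is the Claim_ definition above) =====
theorem lucas_power_spec : Claim_equal_lucas_power := by
  intro n _ hpre
  exact pv_main n.toNat n hpre (le_refl _)
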